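-- pv_equiv track=rewrite | github.com/ryu577/graph | graphing/special_graphs/neural_n_graph/neuro_graph.py | transitive_closure_helper
-- ===== SOURCE A (Python) =====
-- def transitive_closure_helper(g, trans_path, v):
--     '''
--     Helper function of the 'transitive_closure'
--     Parameters:
--         g (dict), a DAG with adjacent list representation
--         trans_path(dict), where key = vertice v, value = a dict maps reachable
--         nodes u to a path of v to u
--         v: a vertex v
--     Return:
--         trans_path(dict)
--     '''
--     if v in trans_path:
--         return trans_path
--     if len(g[v]) == 0:
--         trans_path[v] = {}
--         return trans_path
--     nbrs = g[v]
--     v_dict = {}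
--     for u in nbrs:
--         recur = transitive_closure_helper(g, trans_path, u)
--         u_dict = recur[u]
--         for node in u_dict:
--             if node not in v_dict:
--                 v_dict[node] = [v] + u_dict[node]
--         v_dict[u] = [v, u]
--     trans_path[v] = v_dict
--     return trans_path
-- ===== SOURCE B (Python) =====
-- def transitive_closure_helper(g, trans_path, v):
--     """Iterative re-implementation: explicit two-phase stack DFS instead of
--     memoized recursion. Mutates trans_path in place exactly like the original
--     (same keys inserted in the same postorder); raises ValueError instead of
--     exhausting the recursion limit when a cycle is reachable."""
--     stack = [(v, False)]
--     on_path = set()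
--     while stack:
--         x, done = stack.pop()
--         if x in trans_path:
--             continue
--         nbrs = g[x]
--         if done:
--             x_dict = {}
--             for u in nbrs:
--                 u_dict = trans_path[u]
--                 for node in u_dict:
--                     if node not in x_dict:
--                         x_dict[node] = [x] + u_dict[node]
--                 x_dict[u] = [x, u]
--             on_path.discard(x)
--             trans_path[x] = x_dict
--         else:
--             if x in on_path:
--                 raise ValueError("graph contains a cycle")
--             on_path.add(x)
--             stack.append((x, True))
--             for u in reversed(nbrs):
--                 if u not in trans_path:
--                     stack.append((u, False))
--     return trans_path
-- ===== Notes on version B (the rewrite author's own statement) =====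
-- stated objective: alternative
-- what changed: The memoized recursive DFS is replaced by an iterative two-phase explicit-stack DFS (push node, push unfinished neighbours, finalize with the same merge rule on second visit) with an on-path set for cycle detection, eliminating recursion entirely.
import Mathlib
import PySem

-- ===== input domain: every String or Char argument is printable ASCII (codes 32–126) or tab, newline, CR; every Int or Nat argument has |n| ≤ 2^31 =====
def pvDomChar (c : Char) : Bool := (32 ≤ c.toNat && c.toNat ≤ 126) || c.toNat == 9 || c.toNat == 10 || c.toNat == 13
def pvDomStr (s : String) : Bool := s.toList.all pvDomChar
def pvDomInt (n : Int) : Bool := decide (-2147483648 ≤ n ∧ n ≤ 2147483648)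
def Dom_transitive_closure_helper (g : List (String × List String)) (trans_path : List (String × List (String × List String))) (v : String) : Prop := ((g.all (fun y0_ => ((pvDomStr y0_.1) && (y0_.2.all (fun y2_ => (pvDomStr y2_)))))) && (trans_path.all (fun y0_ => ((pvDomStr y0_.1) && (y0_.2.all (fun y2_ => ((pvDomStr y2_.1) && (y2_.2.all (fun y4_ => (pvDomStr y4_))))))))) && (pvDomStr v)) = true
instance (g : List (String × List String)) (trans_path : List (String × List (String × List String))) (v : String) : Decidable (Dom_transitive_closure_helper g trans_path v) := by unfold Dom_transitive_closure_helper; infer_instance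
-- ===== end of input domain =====

-- B replaces the memoized recursive DFS by an iterative explicit-stack two-phase DFS (same return
-- value and the same in-place mutation of trans_path on every admitted input; where A raises, B
-- raises too — ValueError instead of RecursionError on a reachable cycle).

abbrev TCGraph := PySem.Dict String (List String)
abbrev TCPath  := PySem.Dict String (List (String × List String))
abbrev TCVDict := PySem.Dict String (List String)

-- ===== PORT A =====
-- the inner merge both Pythons share verbatim:
-- 'for node in u_dict: if node not in v_dict: v_dict[node] = [v] + u_dict[node]'; then 'v_dict[u] = [v, u]'
def tcMergeOne (v : String) (vd : TCVDict) (p : String × List String) : TCVDict :=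
  if (vd.get? p.1).isSome then vd else vd.insert p.1 (v :: p.2)

def tcMerge (v : String) (vd : TCVDict) (ud : List (String × List String)) (u : String) : TCVDict :=
  (ud.foldl (tcMergeOne v) vd).insert u [v, u]

mutual
-- fuel-indexed transliteration of A's recursion (none = exception: KeyError / recursion limit;
-- inside Pre_ the fuel g.length + 2 given below is proved sufficient)
def tcA (g : TCGraph) : Nat → TCPath → String → Option TCPath
  | 0, _, _ => none
  | fuel+1, tp, v =>
    if (tp.get? v).isSome then some tp
    else
      match g.get? v with
      | none => none
      | some nbrs =>
        if nbrs.length = 0 then some (tp.insert v [])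
        else
          match tcAFold g fuel tp PySem.Dict.empty v nbrs with
          | none => none
          | some (tp', vd) => some (tp'.insert v vd.items)
termination_by fuel _ _ => (fuel, 0)

-- A's 'for u in nbrs' loop, carrying (trans_path, v_dict)
def tcAFold (g : TCGraph) : Nat → TCPath → TCVDict → String → List String → Option (TCPath × TCVDict)
  | _, tp, vd, _, [] => some (tp, vd)
  | fuel, tp, vd, v, u :: us =>
    match tcA g fuel tp u with
    | none => none
    | some recur =>
      match recur.get? u with
      | none => none
      | some ud => tcAFold g fuel recur (tcMerge v vd ud u) v us
termination_by fuel _ _ _ us => (fuel, us.length + 1)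
end

def transitive_closure_helper (g : List (String × List String)) (trans_path : List (String × List (String × List String))) (v : String) : List (String × List (String × List String)) :=
  ((tcA (PySem.Dict.mk g) (g.length + 2) (PySem.Dict.mk trans_path) v).map PySem.Dict.items).getD trans_path

-- ===== PORT B =====
-- B's finalize: 'x_dict = {}; for u in nbrs: u_dict = trans_path[u]; <merge>' (none = KeyError)
def tcFinStep (tp : TCPath) (x : String) (acc : Option TCVDict) (u : String) : Option TCVDict :=
  match acc with
  | none => none
  | some vd =>
    match tp.get? u with
    | none => none
    | some ud => some (tcMerge x vd ud u)

def tcFinalize (tp : TCPath) (x : String) (nbrs : List String) : Option (List (String × List String)) :=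
  (nbrs.foldl (tcFinStep tp x) (some PySem.Dict.empty)).map PySem.Dict.items

-- termination helpers for B's stack loop (cited in its decreasing_by)
def tcMaxDeg (g : TCGraph) : Nat := (g.items.map (fun p => p.2.length)).foldl max 0

def tcUCount (g : TCGraph) (onp : PySem.Set String) (tp : TCPath) : Nat :=
  (g.keys.filter (fun y => !(PySem.Set.contains onp y) && !(tp.get? y).isSome)).length

lemma tcFilter_length_mono {α : Type} (l : List α) (p q : α → Bool)
    (h : ∀ a, p a = true → q a = true) : (l.filter p).length ≤ (l.filter q).length := by
  induction l with
  | nil => simp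
  | cons a t ih =>
    by_cases hp : p a = true
    · simp only [List.filter_cons, hp, h a hp, List.length_cons, if_true]
      omega
    · have hp' : p a = false := by simpa using hp
      by_cases hq : q a = true <;>
        simp only [List.filter_cons, hp', hq, Bool.false_eq_true, if_false, if_true,
          List.length_cons] <;> omega

lemma tcFilter_length_lt {α : Type} (l : List α) (x : α) (p q : α → Bool)
    (hx : x ∈ l) (hq : q x = true) (hp : p x = false)
    (himp : ∀ a, p a = true → q a = true) :
    (l.filter p).length < (l.filter q).length := by
  induction l with
  | nil => cases hx
  | cons a t ih =>
    rcases List.mem_cons.mp hx with heq | hx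
    · subst heq
      simp only [List.filter_cons, hp, hq, Bool.false_eq_true, if_false, if_true, List.length_cons]
      exact Nat.lt_succ_of_le (tcFilter_length_mono t p q himp)
    · by_cases hpa : p a = true
      · simp only [List.filter_cons, hpa, himp a hpa, if_true, List.length_cons]
        exact Nat.succ_lt_succ (ih hx)
      · have hp' : p a = false := by simpa using hpa
        by_cases hqa : q a = true <;>
          simp only [List.filter_cons, hp', hqa, Bool.false_eq_true, if_false, if_true,
            List.length_cons] <;>
          [exact Nat.lt_succ_of_lt (ih hx); exact ih hx]

lemma tcMem_keys_of_get? (g : TCGraph) (x : String) (nbrs : List String)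
    (h : g.get? x = some nbrs) : x ∈ g.keys := by
  by_contra hmem
  have h0 : g.get? x = none := (PySem.Dict.get?_eq_none_iff_not_mem_keys g x).mpr hmem
  simp [h] at h0

lemma tcDeg_le (g : TCGraph) (x : String) (nbrs : List String)
    (h : g.get? x = some nbrs) : nbrs.length ≤ tcMaxDeg g := by
  unfold PySem.Dict.get? at h
  rcases Option.map_eq_some_iff.mp h with ⟨p, hfind, hp2⟩
  have hmem : p ∈ g.items := List.mem_of_find?_eq_some hfind
  have hlen : nbrs.length ∈ g.items.map (fun p => p.2.length) := by
    subst hp2; exact List.mem_map_of_mem hmem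
  exact ((PySem.List.le_foldl_max (g.items.map (fun p => p.2.length)) 0).2 _ hlen)

lemma tcUCount_final_le (g : TCGraph) (onp : PySem.Set String) (tp : TCPath) (x : String)
    (xd : List (String × List String)) :
    tcUCount g (PySem.Set.discard onp x) (tp.insert x xd) ≤ tcUCount g onp tp := by
  apply tcFilter_length_mono
  intro a ha
  simp only [Bool.and_eq_true, Bool.not_eq_true'] at ha ⊢
  obtain ⟨ha1, ha2⟩ := ha
  have hax : a ≠ x := by
    intro hax; subst hax
    rw [PySem.Dict.get?_insert_self] at ha2; simp at ha2
  constructor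
  · by_contra hc
    have hc' : a ∈ onp := by
      have : ¬ (PySem.Set.contains onp a = false) := hc
      by_contra hm
      exact this (by simpa using hm)
    have hd : a ∈ PySem.Set.discard onp x := by
      rw [PySem.Set.mem_discard]; exact ⟨hc', hax⟩
    have : PySem.Set.contains (PySem.Set.discard onp x) a = true := by simpa using hd
    rw [this] at ha1; cases ha1
  · rw [PySem.Dict.get?_insert, if_neg hax] at ha2
    exact ha2

lemma tcUCount_expand_lt (g : TCGraph) (onp : PySem.Set String) (tp : TCPath) (x : String)
    (hk : x ∈ g.keys) (h1 : (tp.get? x).isSome = false) (h2 : PySem.Set.contains onp x = false) :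
    tcUCount g (PySem.Set.add onp x) tp < tcUCount g onp tp := by
  apply tcFilter_length_lt _ x _ _ hk
  · simp only [Bool.and_eq_true, Bool.not_eq_true']
    exact ⟨h2, h1⟩
  · have hx : x ∈ PySem.Set.add onp x := by rw [PySem.Set.mem_add]; right; rfl
    simp [hx]
  · intro a ha
    simp only [Bool.and_eq_true, Bool.not_eq_true'] at ha ⊢
    obtain ⟨ha1, ha2⟩ := ha
    refine ⟨?_, ha2⟩
    by_contra hc
    have hc' : a ∈ onp := by
      have : ¬ (PySem.Set.contains onp a = false) := hc
      by_contra hm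
      exact this (by simpa using hm)
    have : a ∈ PySem.Set.add onp x := by rw [PySem.Set.mem_add]; left; exact hc'
    have : PySem.Set.contains (PySem.Set.add onp x) a = true := by simpa using this
    rw [this] at ha1; cases ha1

-- B's while loop, by well-founded recursion on ((maxdeg+2)·|unexpanded keys| + |stack|)
def tcB (g : TCGraph) (stack : List (String × Bool)) (onp : PySem.Set String) (tp : TCPath) : Option TCPath :=
  match stack with
  | [] => some tp
  | (x, done) :: rest =>
    if h1 : (tp.get? x).isSome then tcB g rest onp tp
    else
      match hg : g.get? x with
      | none => none
      | some nbrs =>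
        if done then
          match tcFinalize tp x nbrs with
          | none => none
          | some xd => tcB g rest (PySem.Set.discard onp x) (tp.insert x xd)
        else
          if h2 : PySem.Set.contains onp x = true then none
          else tcB g ((nbrs.filter (fun u => !(tp.get? u).isSome)).map (fun u => (u, false)) ++ (x, true) :: rest) (PySem.Set.add onp x) tp
termination_by (tcMaxDeg g + 2) * tcUCount g onp tp + stack.length
decreasing_by
  · simp only [List.length_cons]; omega
  · have hU := tcUCount_final_le g onp tp x xd
    have := Nat.mul_le_mul_left (tcMaxDeg g + 2) hU
    simp only [List.length_cons]; omega
  · have hU : tcUCount g (PySem.Set.add onp x) tp + 1 ≤ tcUCount g onp tp := by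
      have h1' : (tp.get? x).isSome = false := by simpa using h1
      have h2' : PySem.Set.contains onp x = false := by simpa using h2
      exact tcUCount_expand_lt g onp tp x (tcMem_keys_of_get? g x nbrs hg) h1' h2'
    have hmul := Nat.mul_le_mul_left (tcMaxDeg g + 2) hU
    rw [Nat.mul_succ] at hmul
    have hpend : ((nbrs.filter (fun u => !(tp.get? u).isSome)).map (fun u => (u, false))).length ≤ tcMaxDeg g := by
      rw [List.length_map]
      exact le_trans (List.length_filter_le _ _) (tcDeg_le g x nbrs hg)
    simp only [List.length_append, List.length_cons, List.length_map]
    simp only [List.length_map] at hpend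
    omega

def transitive_closure_helper_alt (g : List (String × List String)) (trans_path : List (String × List (String × List String))) (v : String) : List (String × List (String × List String)) :=
  ((tcB (PySem.Dict.mk g) [(v, false)] PySem.Set.empty (PySem.Dict.mk trans_path)).map PySem.Dict.items).getD trans_path

-- ===== PRECONDITION & SPEC =====
-- Pre_ excludes exactly the inputs on which A raises (KeyError on a vertex it must expand that is
-- missing from g, or unbounded recursion on a cycle it reaches): either v is already memoized, or
-- there is a list ord of distinct vertices of g — the part of g that A actually traverses, written
-- in topological order — that contains v and is closed under non-memoized neighbours; nothing is
-- required of vertices A never reaches.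
def Pre_transitive_closure_helper (g : List (String × List String)) (trans_path : List (String × List (String × List String))) (v : String) : Prop :=
  ((PySem.Dict.mk trans_path).get? v).isSome = true ∨
  (((PySem.Dict.mk g).get? v).isSome = true ∧
   ∃ ord ∈ (PySem.Dict.mk g).keys.sublists.flatMap (fun s => PySem.List.permutations s s.length),
     v ∈ ord ∧
     ∀ x ∈ ord, ∀ u ∈ ((PySem.Dict.mk g).get? x).getD [],
       ((PySem.Dict.mk trans_path).get? u).isSome = true ∨
       (u ∈ ord ∧ ((PySem.Dict.mk g).get? u).isSome = true ∧ ord.idxOf u < ord.idxOf x))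

instance (g : List (String × List String)) (trans_path : List (String × List (String × List String))) (v : String) : Decidable (Pre_transitive_closure_helper g trans_path v) := by unfold Pre_transitive_closure_helper; infer_instance

def pvWitness_transitive_closure_helper : (List (String × List String)) × (List (String × List (String × List String))) × String :=
  ([("a", ["b", "c"]), ("b", ["c"]), ("c", [])], [], "a")

def Spec_transitive_closure_helper (g : List (String × List String)) (trans_path : List (String × List (String × List String))) (v : String) (out : List (String × List (String × List String))) : Prop := out = transitive_closure_helper_alt g trans_path v
instance (g : List (String × List String)) (trans_path : List (String × List (String × List String))) (v : String) (out : List (String × List (String × List String))) : Decidable (Spec_transitive_closure_helper g trans_path v out) := by unfold Spec_transitive_closure_helper; infer_instance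

-- ===== CLAIM (what is proved, stated in full; the proofs are below) =====
def Claim_equal_transitive_closure_helper : Prop := ∀ (g : List (String × List String)) (trans_path : List (String × List (String × List String))) (v : String), Dom_transitive_closure_helper g trans_path v → Pre_transitive_closure_helper g trans_path v → Spec_transitive_closure_helper g trans_path v (transitive_closure_helper g trans_path v)

-- ===== LEMMAS AND PROOFS =====

-- hypothesis shapes shared by the lemmas below: tp extends tp0; ord lists (in topological order)
-- vertices of g closed under neighbours that are not memoized in tp0
def tcExt (tp0 tp : TCPath) : Prop := ∀ w, (tp0.get? w).isSome = true → (tp.get? w).isSome = true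

def tcHyp (g : TCGraph) (tp0 : TCPath) (ord : List String) : Prop :=
  ∀ x ∈ ord, ∀ u ∈ (g.get? x).getD [],
    (tp0.get? u).isSome = true ∨ (u ∈ ord ∧ (g.get? u).isSome = true ∧ ord.idxOf u < ord.idxOf x)

def tcStepMerge (tpC : TCPath) (v : String) : TCVDict → String → TCVDict :=
  fun acc u => tcMerge v acc ((tpC.get? u).getD []) u

-- A preserves every existing entry of trans_path
lemma tcA_pres : ∀ (g : TCGraph) (f : Nat),
    (∀ tp v tpA, tcA g f tp v = some tpA → ∀ w d, tp.get? w = some d → tpA.get? w = some d) ∧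
    (∀ tp vd v us tpC vdC, tcAFold g f tp vd v us = some (tpC, vdC) →
      ∀ w d, tp.get? w = some d → tpC.get? w = some d) := by
  intro g f
  induction f with
  | zero =>
    constructor
    · intro tp v tpA h
      simp [tcA] at h
    · intro tp vd v us tpC vdC h w d hw
      cases us with
      | nil =>
        simp only [tcAFold, Option.some.injEq, Prod.mk.injEq] at h
        rw [← h.1]; exact hw
      | cons u us =>
        simp [tcAFold, tcA] at h
  | succ n ih =>
    obtain ⟨ihA, ihF⟩ := ih
    have hA : ∀ tp v tpA, tcA g (n+1) tp v = some tpA →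
        ∀ w d, tp.get? w = some d → tpA.get? w = some d := by
      intro tp v tpA h w d hw
      rw [tcA] at h
      split at h
      · injection h with h; rw [← h]; exact hw
      · rename_i hmemo
        split at h
        · cases h
        · rename_i nbrs hg
          split at h
          · injection h with h
            rw [← h, PySem.Dict.get?_insert]
            rw [if_neg ?_]
            · exact hw
            · intro hwv; subst hwv; rw [hw] at hmemo; simp at hmemo
          · split at h
            · cases h
            · rename_i p hfold
              injection h with h
              rw [← h, PySem.Dict.get?_insert]
              rw [if_neg ?_]
              · exact ihF _ _ _ _ _ _ hfold w d hw
              · intro hwv; subst hwv; rw [hw] at hmemo; simp at hmemo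
    refine ⟨hA, ?_⟩
    intro tp vd v us
    induction us generalizing tp vd with
    | nil =>
      intro tpC vdC h w d hw
      simp only [tcAFold, Option.some.injEq, Prod.mk.injEq] at h
      rw [← h.1]; exact hw
    | cons u us ihus =>
      intro tpC vdC h w d hw
      rw [tcAFold] at h
      split at h
      · cases h
      · rename_i recur hrec
        split at h
        · cases h
        · rename_i ud hud
          exact ihus _ _ _ _ h w d (hA _ _ _ hrec w d hw)

-- A's recursion finishes v itself (v is a key of the result)
lemma tcA_self (g : TCGraph) (f : Nat) (tp : TCPath) (v : String) (tpA : TCPath)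
    (h : tcA g f tp v = some tpA) : (tpA.get? v).isSome = true := by
  cases f with
  | zero => simp [tcA] at h
  | succ n =>
    rw [tcA] at h
    split at h
    · rename_i hmemo; injection h with h; rw [← h]; exact hmemo
    · split at h
      · cases h
      · split at h
        · injection h with h; rw [← h, PySem.Dict.get?_insert_self]; rfl
        · split at h
          · cases h
          · injection h with h; rw [← h, PySem.Dict.get?_insert_self]; rfl

lemma tcA_memo (g : TCGraph) (n : Nat) (tp : TCPath) (v : String)
    (h : (tp.get? v).isSome = true) : tcA g (n+1) tp v = some tp := by
  rw [tcA, if_pos h]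

lemma tcA_memo_inv (g : TCGraph) (f : Nat) (tp : TCPath) (u : String) (recur : TCPath)
    (hm : (tp.get? u).isSome = true) (h : tcA g f tp u = some recur) : recur = tp := by
  cases f with
  | zero => rw [tcA] at h; cases h
  | succ n =>
    rw [tcA_memo g n tp u hm] at h
    injection h with h; exact h.symm

lemma tcA_ext (g : TCGraph) (f : Nat) (tp0 tp tpA : TCPath) (v : String)
    (hExt : tcExt tp0 tp) (h : tcA g f tp v = some tpA) : tcExt tp0 tpA := by
  intro w hw
  obtain ⟨d, hd⟩ := Option.isSome_iff_exists.mp (hExt w hw)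
  rw [(tcA_pres g f).1 _ _ _ h w d hd]; rfl

-- every key newly finished by A's run from v sits at or below v in the topological order
lemma tcA_idx (g : TCGraph) (tp0 : TCPath) (ord : List String) (hHyp : tcHyp g tp0 ord) :
    ∀ (f : Nat),
    (∀ tp v tpA, tcExt tp0 tp → ((tp.get? v).isSome = true ∨ v ∈ ord) →
      tcA g f tp v = some tpA →
      ∀ w, tp.get? w = none → (tpA.get? w).isSome = true → w = v ∨ ord.idxOf w < ord.idxOf v) ∧
    (∀ tp vd v us tpC vdC, tcExt tp0 tp →
      (∀ u ∈ us, (tp0.get? u).isSome = true ∨ (u ∈ ord ∧ ord.idxOf u < ord.idxOf v)) →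
      tcAFold g f tp vd v us = some (tpC, vdC) →
      ∀ w, tp.get? w = none → (tpC.get? w).isSome = true → ord.idxOf w < ord.idxOf v) := by
  intro f
  induction f with
  | zero =>
    constructor
    · intro tp v tpA _ _ h
      simp [tcA] at h
    · intro tp vd v us tpC vdC _ _ h w hw hwC
      cases us with
      | nil =>
        simp only [tcAFold, Option.some.injEq, Prod.mk.injEq] at h
        rw [← h.1, hw] at hwC; simp at hwC
      | cons u us => simp [tcAFold, tcA] at h
  | succ n ih =>
    obtain ⟨ihA, ihF⟩ := ih
    have hA : ∀ tp v tpA, tcExt tp0 tp → ((tp.get? v).isSome = true ∨ v ∈ ord) →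
        tcA g (n+1) tp v = some tpA →
        ∀ w, tp.get? w = none → (tpA.get? w).isSome = true → w = v ∨ ord.idxOf w < ord.idxOf v := by
      intro tp v tpA hExt hMem h w hw hwC
      rw [tcA] at h
      split at h
      · injection h with h; rw [← h, hw] at hwC; simp at hwC
      · rename_i hmemo
        have hvord : v ∈ ord := hMem.resolve_left hmemo
        split at h
        · cases h
        · rename_i nbrs hg
          split at h
          · injection h with h
            rw [← h, PySem.Dict.get?_insert] at hwC
            by_cases hwv : w = v
            · exact Or.inl hwv
            · rw [if_neg hwv, hw] at hwC; simp at hwC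
          · split at h
            · cases h
            · rename_i tp' vd hfold
              injection h with h
              rw [← h, PySem.Dict.get?_insert] at hwC
              by_cases hwv : w = v
              · exact Or.inl hwv
              · rw [if_neg hwv] at hwC
                refine Or.inr (ihF _ _ _ _ _ _ hExt ?_ hfold w hw hwC)
                intro u hu
                exact (hHyp v hvord u (by simpa [hg] using hu)).imp id (fun h => ⟨h.1, h.2.2⟩)
    refine ⟨hA, ?_⟩
    intro tp vd v us
    induction us generalizing tp vd with
    | nil =>
      intro tpC vdC _ _ h w hw hwC
      simp only [tcAFold, Option.some.injEq, Prod.mk.injEq] at h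
      rw [← h.1, hw] at hwC; simp at hwC
    | cons u us ihus =>
      intro tpC vdC hExt hHN h w hw hwC
      rw [tcAFold] at h
      split at h
      · cases h
      · rename_i recur hrec
        split at h
        · cases h
        · rename_i ud hud
          by_cases hwr : (recur.get? w).isSome = true
          · by_cases hu : (tp.get? u).isSome = true
            · have hmemo := tcA_memo g n tp u hu
              rw [hmemo] at hrec; injection hrec with hrec
              rw [← hrec, hw] at hwr; simp at hwr
            · have hu0 : ¬ (tp0.get? u).isSome = true := fun hs => hu (hExt u hs)
              obtain ⟨huord, hidxu⟩ := (hHN u (List.mem_cons_self ..)).resolve_left hu0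
              rcases hA tp u recur hExt (Or.inr huord) hrec w hw hwr with rfl | hlt
              · exact hidxu
              · exact lt_trans hlt hidxu
          · have hwr' : recur.get? w = none := by
              cases hrw : recur.get? w
              · rfl
              · rw [hrw] at hwr; simp at hwr
            exact ihus recur (tcMerge v vd ud u) tpC vdC
              (tcA_ext g (n+1) tp0 tp recur u hExt hrec)
              (fun a ha => hHN a (List.mem_cons_of_mem _ ha)) h w hwr' hwC

-- within ord, fuel idxOf v + 2 suffices for A's recursion
lemma tcA_total (g : TCGraph) (tp0 : TCPath) (ord : List String) (hHyp : tcHyp g tp0 ord) :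
    ∀ (f : Nat),
    (∀ tp v, tcExt tp0 tp →
      ((tp.get? v).isSome = true ∨ (v ∈ ord ∧ (g.get? v).isSome = true)) →
      ord.idxOf v + 2 ≤ f → (tcA g f tp v).isSome = true) ∧
    (∀ tp vd v us, tcExt tp0 tp →
      (∀ u ∈ us, (tp0.get? u).isSome = true ∨ (u ∈ ord ∧ (g.get? u).isSome = true ∧ ord.idxOf u < ord.idxOf v)) →
      ord.idxOf v + 1 ≤ f → (tcAFold g f tp vd v us).isSome = true) := by
  intro f
  induction f with
  | zero =>
    exact ⟨fun tp v _ _ h => absurd h (by omega), fun tp vd v us _ _ h => absurd h (by omega)⟩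
  | succ n ih =>
    obtain ⟨ihA, ihF⟩ := ih
    have hA : ∀ tp v, tcExt tp0 tp →
        ((tp.get? v).isSome = true ∨ (v ∈ ord ∧ (g.get? v).isSome = true)) →
        ord.idxOf v + 2 ≤ n + 1 → (tcA g (n+1) tp v).isSome = true := by
      intro tp v hExt hv hfuel
      by_cases hm : (tp.get? v).isSome = true
      · rw [tcA_memo g n tp v hm]; rfl
      · obtain ⟨hvord, hkey⟩ := hv.resolve_left hm
        obtain ⟨nbrs, hg⟩ := Option.isSome_iff_exists.mp hkey
        have heq : tcA g (n+1) tp v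
            = (if nbrs.length = 0 then some (tp.insert v []) else
                match tcAFold g n tp PySem.Dict.empty v nbrs with
                | none => none
                | some (tp', vd) => some (tp'.insert v vd.items)) := by
          rw [tcA, if_neg hm, hg]
        rw [heq]
        by_cases hlen : nbrs.length = 0
        · rw [if_pos hlen]; rfl
        · rw [if_neg hlen]
          have hfold : (tcAFold g n tp PySem.Dict.empty v nbrs).isSome = true := by
            apply ihF tp PySem.Dict.empty v nbrs hExt
            · intro u hu
              exact hHyp v hvord u (by simpa [hg] using hu)
            · omega
          obtain ⟨⟨tp', vd⟩, hf⟩ := Option.isSome_iff_exists.mp hfold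
          rw [hf]; rfl
    refine ⟨hA, ?_⟩
    intro tp vd v us
    induction us generalizing tp vd with
    | nil => intro _ _ _; rw [tcAFold]; rfl
    | cons u us ihus =>
      intro hExt hus hfuel
      by_cases hm : (tp.get? u).isSome = true
      · obtain ⟨ud, hud⟩ := Option.isSome_iff_exists.mp hm
        have heq : tcAFold g (n+1) tp vd v (u :: us) = tcAFold g (n+1) tp (tcMerge v vd ud u) v us := by
          rw [tcAFold, tcA_memo g n tp u hm]; simp only [hud]
        rw [heq]
        exact ihus tp (tcMerge v vd ud u) hExt (fun a ha => hus a (List.mem_cons_of_mem _ ha)) hfuel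
      · have hu0 : ¬ (tp0.get? u).isSome = true := fun hs => hm (hExt u hs)
        obtain ⟨huord, hk, hidx⟩ := (hus u (List.mem_cons_self ..)).resolve_left hu0
        have hcall : (tcA g (n+1) tp u).isSome = true :=
          hA tp u hExt (Or.inr ⟨huord, hk⟩) (by omega)
        obtain ⟨recur, hrec⟩ := Option.isSome_iff_exists.mp hcall
        obtain ⟨ud, hud⟩ := Option.isSome_iff_exists.mp (tcA_self g (n+1) tp u recur hrec)
        have heq : tcAFold g (n+1) tp vd v (u :: us) = tcAFold g (n+1) recur (tcMerge v vd ud u) v us := by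
          rw [tcAFold, hrec]; simp only [hud]
        rw [heq]
        exact ihus recur (tcMerge v vd ud u)
          (tcA_ext g (n+1) tp0 tp recur u hExt hrec)
          (fun a ha => hus a (List.mem_cons_of_mem _ ha)) hfuel

-- B-side step equations
lemma tcB_nil (g : TCGraph) (onp : PySem.Set String) (tp : TCPath) : tcB g [] onp tp = some tp := by
  rw [tcB]

lemma tcB_skip (g : TCGraph) (x : String) (d : Bool) (rest : List (String × Bool))
    (onp : PySem.Set String) (tp : TCPath) (h : (tp.get? x).isSome = true) :
    tcB g ((x, d) :: rest) onp tp = tcB g rest onp tp := by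
  rw [tcB]; rw [dif_pos h]

lemma tcB_expand (g : TCGraph) (x : String) (rest : List (String × Bool))
    (onp : PySem.Set String) (tp : TCPath) (nbrs : List String)
    (h1 : (tp.get? x).isSome = false) (hg : g.get? x = some nbrs)
    (h2 : PySem.Set.contains onp x = false) :
    tcB g ((x, false) :: rest) onp tp
      = tcB g ((nbrs.filter (fun u => !(tp.get? u).isSome)).map (fun u => (u, false)) ++ (x, true) :: rest) (PySem.Set.add onp x) tp := by
  rw [tcB]
  rw [dif_neg (by simp [h1])]
  split
  · rename_i heq; rw [hg] at heq; cases heq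
  · rename_i nbrs' heq; rw [hg] at heq; injection heq with heq; subst heq
    rw [if_neg (by simp)]
    rw [dif_neg (by simpa using h2)]

lemma tcB_finalize (g : TCGraph) (x : String) (rest : List (String × Bool))
    (onp : PySem.Set String) (tp : TCPath) (nbrs : List String)
    (xd : List (String × List String))
    (h1 : (tp.get? x).isSome = false) (hg : g.get? x = some nbrs)
    (hfin : tcFinalize tp x nbrs = some xd) :
    tcB g ((x, true) :: rest) onp tp
      = tcB g rest (PySem.Set.discard onp x) (tp.insert x xd) := by
  rw [tcB]
  rw [dif_neg (by simp [h1])]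
  split
  · rename_i heq; rw [hg] at heq; cases heq
  · rename_i nbrs' heq; rw [hg] at heq; injection heq with heq; subst heq
    rw [if_pos rfl]
    rw [hfin]

lemma tcSet_discard_add (onp : PySem.Set String) (x : String) (h : x ∉ onp) :
    PySem.Set.discard (PySem.Set.add onp x) x = onp := by
  rw [PySem.Set.add_of_not_mem h]
  show List.filter _ _ = _
  rw [List.filter_append]
  have h2 : ∀ y ∈ onp, (!y == x) = true := by
    intro y hy
    simp only [Bool.not_eq_eq_eq_not, Bool.not_true, beq_eq_false_iff_ne]
    intro hyx; exact h (hyx ▸ hy)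
  rw [List.filter_eq_self.mpr h2]
  simp

lemma tcFinalize_of_all_some (tp : TCPath) (x : String) :
    ∀ (nbrs : List String) (vd : TCVDict), (∀ u ∈ nbrs, (tp.get? u).isSome = true) →
    nbrs.foldl (tcFinStep tp x) (some vd) = some (nbrs.foldl (tcStepMerge tp x) vd) := by
  intro nbrs
  induction nbrs with
  | nil => intro vd h; rfl
  | cons u us ih =>
    intro vd h
    have hu : (tp.get? u).isSome = true := h u (List.mem_cons_self ..)
    obtain ⟨ud, hud⟩ := Option.isSome_iff_exists.mp hu
    have hstep : tcFinStep tp x (some vd) u = some (tcStepMerge tp x vd u) := by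
      simp [tcFinStep, tcStepMerge, hud]
    simp only [List.foldl_cons, hstep]
    exact ih _ (fun a ha => h a (List.mem_cons_of_mem _ ha))

-- the inner simulation: A's neighbour loop versus B's pending-stack segment
lemma tcMainFold (g : TCGraph) (tp0 : TCPath) (ord : List String) (f : Nat)
    (hP : ∀ tp v tpA onp s, tcExt tp0 tp → ((tp.get? v).isSome = true ∨ v ∈ ord) →
      tcA g f tp v = some tpA →
      (tp.get? v = none → ∀ w ∈ onp, ord.idxOf v < ord.idxOf w) →
      tcB g ((v, false) :: s) onp tp = tcB g s onp tpA) :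
    ∀ (us : List String) (tpE tp : TCPath) (vd : TCVDict) (v : String) (tpC : TCPath)
      (vdC : TCVDict) (onp : PySem.Set String),
      tcExt tp0 tp → tcExt tpE tp →
      (∀ u ∈ us, (tp0.get? u).isSome = true ∨ (u ∈ ord ∧ ord.idxOf u < ord.idxOf v)) →
      (∀ w ∈ onp, ord.idxOf v ≤ ord.idxOf w) →
      tcAFold g f tp vd v us = some (tpC, vdC) →
      ((∀ s, tcB g ((us.filter (fun u => !(tpE.get? u).isSome)).map (fun u => (u, false)) ++ s) onp tp
           = tcB g s onp tpC)
       ∧ vdC = us.foldl (tcStepMerge tpC v) vd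
       ∧ ∀ u ∈ us, (tpC.get? u).isSome = true) := by
  intro us
  induction us with
  | nil =>
    intro tpE tp vd v tpC vdC onp _ _ _ _ hFold
    simp only [tcAFold, Option.some.injEq, Prod.mk.injEq] at hFold
    obtain ⟨h1, h2⟩ := hFold
    subst h1; subst h2
    exact ⟨fun s => by simp, by simp, by simp⟩
  | cons u us ihus =>
    intro tpE tp vd v tpC vdC onp hExt0 hExtE hHN hHF hFold
    rw [tcAFold] at hFold
    split at hFold
    · cases hFold
    · rename_i recur hrec
      split at hFold
      · cases hFold
      · rename_i ud hud
        by_cases hm : (tp.get? u).isSome = true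
        · -- A's call is a memo hit: recur = tp
          have hrtp : recur = tp := tcA_memo_inv g f tp u recur hm hrec
          rw [hrtp] at hFold hud
          have huC : tpC.get? u = some ud := (tcA_pres g f).2 _ _ _ _ _ _ hFold u ud hud
          obtain ⟨c1, c2, c3⟩ := ihus tpE tp (tcMerge v vd ud u) v tpC vdC onp hExt0 hExtE
            (fun a ha => hHN a (List.mem_cons_of_mem _ ha)) hHF hFold
          have hstep : tcStepMerge tpC v vd u = tcMerge v vd ud u := by
            simp [tcStepMerge, huC]
          by_cases hE : (tpE.get? u).isSome = true
          · -- u already finished at expansion time: not on B's pending list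
            have hEn : ¬ tpE.get? u = none := by
              intro h; rw [h] at hE; cases hE
            have hfil : (u :: us).filter (fun a => !(tpE.get? a).isSome)
                = us.filter (fun a => !(tpE.get? a).isSome) := by
              simp [hEn]
            refine ⟨fun s => ?_, ?_, ?_⟩
            · rw [hfil]; exact c1 s
            · rw [List.foldl_cons, hstep]; exact c2
            · intro a ha
              rcases List.mem_cons.mp ha with rfl | ha
              · rw [huC]; rfl
              · exact c3 a ha
          · -- pushed, but finished meanwhile: B pops and skips it
            have hEn : tpE.get? u = none := by
              cases h : tpE.get? u
              · rfl
              · rw [h] at hE; simp at hE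
            have hfil : (u :: us).filter (fun a => !(tpE.get? a).isSome)
                = u :: us.filter (fun a => !(tpE.get? a).isSome) := by
              simp [hEn]
            refine ⟨fun s => ?_, ?_, ?_⟩
            · rw [hfil, List.map_cons, List.cons_append]
              rw [tcB_skip g u false _ onp tp hm]
              exact c1 s
            · rw [List.foldl_cons, hstep]; exact c2
            · intro a ha
              rcases List.mem_cons.mp ha with rfl | ha
              · rw [huC]; rfl
              · exact c3 a ha
        · -- A recurses for real; B pops (u, false) and runs the same sub-search
          have hv : tp.get? u = none := by
            cases h : tp.get? u
            · rfl
            · rw [h] at hm; simp at hm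
          have hEn : tpE.get? u = none := by
            cases h : tpE.get? u
            · rfl
            · exact absurd (hExtE u (by rw [h]; rfl)) hm
          have hfil : (u :: us).filter (fun a => !(tpE.get? a).isSome)
              = u :: us.filter (fun a => !(tpE.get? a).isSome) := by
            simp [hEn]
          have hu0 : ¬ (tp0.get? u).isSome = true := fun hs => hm (hExt0 u hs)
          obtain ⟨huord, hidxu⟩ := (hHN u (List.mem_cons_self ..)).resolve_left hu0
          have hH4 : tp.get? u = none → ∀ w ∈ onp, ord.idxOf u < ord.idxOf w :=
            fun _ w hw => lt_of_lt_of_le hidxu (hHF w hw)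
          have huC : tpC.get? u = some ud := (tcA_pres g f).2 _ _ _ _ _ _ hFold u ud hud
          obtain ⟨c1, c2, c3⟩ := ihus tpE recur (tcMerge v vd ud u) v tpC vdC onp
            (tcA_ext g f tp0 tp recur u hExt0 hrec)
            (tcA_ext g f tpE tp recur u hExtE hrec)
            (fun a ha => hHN a (List.mem_cons_of_mem _ ha)) hHF hFold
          refine ⟨fun s => ?_, ?_, ?_⟩
          · rw [hfil, List.map_cons, List.cons_append]
            rw [hP tp u recur onp _ hExt0 (Or.inr huord) hrec hH4]
            exact c1 s
          · rw [List.foldl_cons]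
            have hstep : tcStepMerge tpC v vd u = tcMerge v vd ud u := by
              simp [tcStepMerge, huC]
            rw [hstep]; exact c2
          · intro a ha
            rcases List.mem_cons.mp ha with rfl | ha
            · rw [huC]; rfl
            · exact c3 a ha

-- the outer simulation: one A-call versus B's processing of one pushed node
lemma tcMain (g : TCGraph) (tp0 : TCPath) (ord : List String) (hHyp : tcHyp g tp0 ord) :
    ∀ (f : Nat) (tp : TCPath) (v : String) (tpA : TCPath) (onp : PySem.Set String)
      (s : List (String × Bool)),
      tcExt tp0 tp → ((tp.get? v).isSome = true ∨ v ∈ ord) → tcA g f tp v = some tpA →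
      (tp.get? v = none → ∀ w ∈ onp, ord.idxOf v < ord.idxOf w) →
      tcB g ((v, false) :: s) onp tp = tcB g s onp tpA := by
  intro f
  induction f with
  | zero =>
    intro tp v tpA onp s _ _ hA
    simp [tcA] at hA
  | succ n ihn =>
    intro tp v tpA onp s hExt hMem hA hH4
    by_cases hm : (tp.get? v).isSome = true
    · rw [tcA_memo g n tp v hm] at hA
      injection hA with hA
      rw [tcB_skip g v false s onp tp hm, hA]
    · have hv : tp.get? v = none := by
        cases h : tp.get? v
        · rfl
        · rw [h] at hm; simp at hm
      have hm' : (tp.get? v).isSome = false := by rw [hv]; rfl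
      have hvord : v ∈ ord := hMem.resolve_left hm
      have hvonp : v ∉ onp := by
        intro hmem
        exact absurd (hH4 hv v hmem) (lt_irrefl _)
      have hnotin : PySem.Set.contains onp v = false := by
        cases h : PySem.Set.contains onp v
        · rfl
        · exact absurd (by simpa using h) hvonp
      rw [tcA] at hA
      rw [if_neg hm] at hA
      split at hA
      · cases hA
      · rename_i nbrs hg
        have hnbrs : ∀ u ∈ nbrs, (tp0.get? u).isSome = true ∨ (u ∈ ord ∧ ord.idxOf u < ord.idxOf v) :=
          fun u hu => (hHyp v hvord u (by simpa [hg] using hu)).imp id (fun h => ⟨h.1, h.2.2⟩)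
        rw [tcB_expand g v s onp tp nbrs hm' hg hnotin]
        split at hA
        · -- leaf: no neighbours
          rename_i hlen
          injection hA with hA
          have hnil : nbrs = [] := List.length_eq_zero_iff.mp hlen
          subst hnil
          simp only [List.filter_nil, List.map_nil, List.nil_append]
          rw [tcB_finalize g v s (PySem.Set.add onp v) tp [] [] hm' hg rfl]
          rw [tcSet_discard_add onp v hvonp, hA]
        · rename_i hlen
          split at hA
          · cases hA
          · rename_i tpC vdC hfold
            injection hA with hA
            have hHF : ∀ w ∈ PySem.Set.add onp v, ord.idxOf v ≤ ord.idxOf w := by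
              intro w hw
              rcases (PySem.Set.mem_add ..).mp hw with hw | rfl
              · exact le_of_lt (hH4 hv w hw)
              · exact le_refl _
            obtain ⟨c1, c2, c3⟩ := tcMainFold g tp0 ord n ihn nbrs tp tp
              PySem.Dict.empty v tpC vdC (PySem.Set.add onp v) hExt (fun w h => h)
              hnbrs hHF hfold
            rw [c1 ((v, true) :: s)]
            have hvC : (tpC.get? v).isSome = false := by
              cases h : (tpC.get? v).isSome
              · rfl
              · exact absurd
                  ((tcA_idx g tp0 ord hHyp n).2 tp PySem.Dict.empty v nbrs tpC vdC hExt
                    hnbrs hfold v hv h)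
                  (lt_irrefl _)
            have hfin : tcFinalize tpC v nbrs = some vdC.items := by
              unfold tcFinalize
              rw [tcFinalize_of_all_some tpC v nbrs PySem.Dict.empty c3]
              rw [← c2]
              rfl
            rw [tcB_finalize g v s (PySem.Set.add onp v) tpC nbrs vdC.items hvC hg hfin]
            rw [tcSet_discard_add onp v hvonp, hA]

-- ===== VERDICT (by name: the statement is the Claim_ definition above) =====
theorem transitive_closure_helper_spec : Claim_equal_transitive_closure_helper := by
  unfold Claim_equal_transitive_closure_helper
  intro g tp v _ hPre
  unfold Spec_transitive_closure_helper
  unfold Pre_transitive_closure_helper at hPre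
  unfold transitive_closure_helper transitive_closure_helper_alt
  rcases hPre with hmemo | ⟨hkey, ord, hordmem, hvord, hhyp⟩
  · have hA : tcA (PySem.Dict.mk g) (g.length + 2) (PySem.Dict.mk tp) v
        = some (PySem.Dict.mk tp) :=
      tcA_memo (PySem.Dict.mk g) (g.length + 1) (PySem.Dict.mk tp) v hmemo
    rw [hA, tcB_skip _ v false [] PySem.Set.empty _ hmemo, tcB_nil]
  · have hH : tcHyp (PySem.Dict.mk g) (PySem.Dict.mk tp) ord := hhyp
    obtain ⟨s, hs, hperm⟩ := List.mem_flatMap.mp hordmem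
    have hPerm : ord.Perm s := PySem.List.perm_of_mem_permutations hperm
    have hsub : s.Sublist (PySem.Dict.mk g).keys := List.mem_sublists.mp hs
    have hlen : ord.length ≤ g.length := by
      have h1 : ord.length = s.length := hPerm.length_eq
      have h2 : s.length ≤ (PySem.Dict.mk g).keys.length := hsub.length_le
      have h3 : (PySem.Dict.mk g).keys.length = g.length := by
        show (g.map Prod.fst).length = g.length
        exact List.length_map ..
      omega
    have hfuel : ord.idxOf v + 2 ≤ g.length + 2 := by
      have := List.idxOf_le_length (l := ord) (a := v)
      omega
    have htot := (tcA_total (PySem.Dict.mk g) (PySem.Dict.mk tp) ord hH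
      (g.length + 2)).1 (PySem.Dict.mk tp) v (fun w h => h) (Or.inr ⟨hvord, hkey⟩) hfuel
    obtain ⟨tpA, hA⟩ := Option.isSome_iff_exists.mp htot
    have hmain := tcMain (PySem.Dict.mk g) (PySem.Dict.mk tp) ord hH (g.length + 2)
      (PySem.Dict.mk tp) v tpA PySem.Set.empty [] (fun w h => h) (Or.inr hvord) hA
      (fun _ w hw => absurd hw (List.not_mem_nil))
    rw [hA, hmain, tcB_nil]
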